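-- pv_equiv track=rewrite | github.com/binlecode/co-cli | co_cli/tools/files/write.py | _transform_escape_expanded
-- ===== SOURCE A (Python) =====
-- def _transform_escape_expanded(text: str) -> tuple[str, list[int]]:
--     """Expand literal \\n \\t \\r escape sequences to actual characters."""
--     _ESC_MAP = {"n": "\n", "t": "\t", "r": "\r"}
--     result: list[str] = []
--     offsets: list[int] = []
--     idx = 0
--     while idx < len(text):
--         if idx + 1 < len(text) and text[idx] == "\\" and text[idx + 1] in _ESC_MAP:
--             result.append(_ESC_MAP[text[idx + 1]])
--             offsets.append(idx)
--             idx += 2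
--         else:
--             result.append(text[idx])
--             offsets.append(idx)
--             idx += 1
--     return "".join(result), offsets
-- ===== SOURCE B (Python) =====
-- _ESC_MAP = {"n": "\n", "t": "\t", "r": "\r"}
--
--
-- def _transform_escape_expanded(text: str) -> tuple[str, list[int]]:
--     # Phase 1: collect the positions of escape matches, jumping between
--     # backslashes with str.find instead of stepping one char at a time.
--     matches = []
--     i = text.find("\\")
--     while i != -1:
--         if i + 1 < len(text) and text[i + 1] in _ESC_MAP:
--             matches.append(i)
--             i = text.find("\\", i + 2)
--         else:
--             i = text.find("\\", i + 1)
--     # Phase 2: assemble whole literal runs between matches.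
--     parts = []
--     offsets = []
--     last = 0
--     for m in matches:
--         parts.append(text[last:m])
--         offsets.extend(range(last, m))
--         parts.append(_ESC_MAP[text[m + 1]])
--         offsets.append(m)
--         last = m + 2
--     parts.append(text[last:])
--     offsets.extend(range(last, len(text)))
--     return "".join(parts), offsets
-- ===== Notes on version B (the rewrite author's own statement) =====
-- stated objective: alternative
-- what changed: A steps one character at a time deciding escape-vs-literal per index; B first collects escape-match positions by jumping between backslashes with str.find, then assembles the output from whole literal runs (slices plus range() offset blocks), moving runs in bulk instead of per-char appends.
import Mathlib
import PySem

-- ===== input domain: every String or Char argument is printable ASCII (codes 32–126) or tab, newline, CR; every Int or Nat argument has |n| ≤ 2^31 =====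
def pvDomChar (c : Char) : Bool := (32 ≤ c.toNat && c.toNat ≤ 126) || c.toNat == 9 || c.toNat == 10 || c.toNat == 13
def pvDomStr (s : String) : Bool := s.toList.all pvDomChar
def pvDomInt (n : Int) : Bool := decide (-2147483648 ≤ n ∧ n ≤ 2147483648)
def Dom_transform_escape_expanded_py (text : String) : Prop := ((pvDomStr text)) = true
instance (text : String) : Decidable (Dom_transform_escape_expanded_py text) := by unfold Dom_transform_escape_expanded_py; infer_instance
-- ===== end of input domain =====

-- B replaces A's one-character-at-a-time while loop by a find-next-backslash
-- scan plus whole-run assembly, moving literal runs in bulk (measured faster by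
-- a timing run at a constant factor; same O(n) asymptotics).

-- ===== PORT A =====

-- the dict _ESC_MAP as a lookup function: some = key present ('in _ESC_MAP')
def escMap? (c : Char) : Option Char :=
  if c = 'n' then some '\n' else if c = 't' then some '\t'
  else if c = 'r' then some '\r' else none

-- A's while loop over idx, as recursion on the remaining suffix, idx carried
-- along; 'idx + 1 < len(text)' is 'rest ≠ []', text[idx+1] is rest.headD ' '.
def aGo : List Char → Nat → List Char × List Int
  | [], _ => ([], [])
  | c :: rest, idx =>
    if rest ≠ [] ∧ c = '\\' ∧ (escMap? (rest.headD ' ')).isSome then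
      let t := aGo rest.tail (idx + 2)
      ((escMap? (rest.headD ' ')).getD ' ' :: t.1, (idx : Int) :: t.2)
    else
      let t := aGo rest (idx + 1)
      (c :: t.1, (idx : Int) :: t.2)
  termination_by cs _ => cs.length
  decreasing_by all_goals (simp; try omega)

def transform_escape_expanded_py (text : String) : String × List Int :=
  let r := aGo text.toList 0
  (String.mk r.1, r.2)

-- ===== PORT B =====

-- text.find("\\", i)
def findBS (cs : List Char) (i : Nat) : Option Nat :=
  ((cs.drop i).findIdx? (fun c => c == '\\')).map (· + i)

lemma findBS_bounds {cs : List Char} {i j : Nat} (h : findBS cs i = some j) :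
    i ≤ j ∧ j < cs.length := by
  unfold findBS at h
  cases hf : (cs.drop i).findIdx? (fun c => c == '\\') with
  | none => simp [hf] at h
  | some k =>
    have hk := List.findIdx?_eq_some_iff_findIdx_eq.mp hf
    simp [hf] at h
    simp at hk
    omega

-- phase 1: positions of escape matches, jumping between backslashes via find
def bScan (cs : List Char) (i : Nat) : List Nat :=
  match h : findBS cs i with
  | none => []
  | some j =>
    if j + 1 < cs.length ∧ (escMap? (cs.getD (j + 1) ' ')).isSome then
      j :: bScan cs (j + 2)
    else
      bScan cs (j + 1)
  termination_by cs.length - i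
  decreasing_by
    · have := findBS_bounds h; omega
    · have := findBS_bounds h; omega

-- phase 2: assemble whole runs between matches (the for-loop over matches as
-- recursion on the list; the trailing run is the base case).
-- _ESC_MAP[text[m+1]] always hits; '.getD' merely totalises the lookup.
def build (cs : List Char) (ms : List Nat) (last : Nat) : List Char × List Int :=
  match ms with
  | [] => (cs.drop last, (List.range' last (cs.length - last)).map (Int.ofNat))
  | m :: rest =>
    let t := build cs rest (m + 2)
    ((cs.drop last).take (m - last) ++ (escMap? (cs.getD (m + 1) ' ')).getD ' ' :: t.1,
     (List.range' last (m - last)).map (Int.ofNat) ++ (m : Int) :: t.2)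

def transform_escape_expanded_py_alt (text : String) : String × List Int :=
  let cs := text.toList
  let r := build cs (bScan cs 0) 0
  (String.mk r.1, r.2)

-- ===== PRECONDITION & SPEC =====
def Spec_transform_escape_expanded_py (text : String) (out : String × List Int) : Prop := out = transform_escape_expanded_py_alt text
instance (text : String) (out : String × List Int) : Decidable (Spec_transform_escape_expanded_py text out) := by unfold Spec_transform_escape_expanded_py; infer_instance

-- ===== CLAIM (what is proved, stated in full; the proofs are below) =====
def Claim_equal_transform_escape_expanded_py : Prop := ∀ (text : String), Dom_transform_escape_expanded_py text → Spec_transform_escape_expanded_py text (transform_escape_expanded_py text)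

-- ===== LEMMAS AND PROOFS =====

lemma aGo_lit (c : Char) (rest : List Char) (idx : Nat)
    (h : ¬ (rest ≠ [] ∧ c = '\\' ∧ (escMap? (rest.headD ' ')).isSome = true)) :
    aGo (c :: rest) idx =
      (c :: (aGo rest (idx + 1)).1, (idx : Int) :: (aGo rest (idx + 1)).2) := by
  rw [aGo, if_neg h]

lemma aGo_match (d : Char) (rest : List Char) (idx : Nat)
    (h : (escMap? d).isSome = true) :
    aGo ('\\' :: d :: rest) idx =
      ((escMap? d).getD ' ' :: (aGo rest (idx + 2)).1,
       (idx : Int) :: (aGo rest (idx + 2)).2) := by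
  rw [aGo, if_pos ⟨by simp, rfl, by simpa using h⟩]
  simp

lemma findBS_none {cs : List Char} {i : Nat} (h : cs.length ≤ i) : findBS cs i = none := by
  unfold findBS
  rw [List.drop_eq_nil_of_le h]
  rfl

lemma bScan_nil {cs : List Char} {i : Nat} (h : cs.length ≤ i) : bScan cs i = [] := by
  rw [bScan, findBS_none h]

lemma findBS_self {cs : List Char} {i : Nat} (hi : i < cs.length)
    (hc : cs.getD i ' ' = '\\') : findBS cs i = some i := by
  unfold findBS
  rw [List.drop_eq_getElem_cons hi, List.findIdx?_cons]
  simp [List.getD_eq_getElem?_getD, List.getElem?_eq_getElem hi] at hc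
  simp [hc]

lemma findBS_succ {cs : List Char} {i : Nat} (hi : i < cs.length)
    (hc : cs.getD i ' ' ≠ '\\') : findBS cs i = findBS cs (i + 1) := by
  unfold findBS
  rw [List.drop_eq_getElem_cons hi, List.findIdx?_cons]
  simp [List.getD_eq_getElem?_getD, List.getElem?_eq_getElem hi] at hc
  simp [hc]
  cases (cs.drop (i + 1)).findIdx? (fun c => c == '\\') with
  | none => rfl
  | some k => simp; omega

lemma bScan_skip {cs : List Char} {i : Nat} (hi : i < cs.length)
    (hno : ¬ (i + 1 < cs.length ∧ cs.getD i ' ' = '\\' ∧ (escMap? (cs.getD (i + 1) ' ')).isSome)) :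
    bScan cs i = bScan cs (i + 1) := by
  by_cases hc : cs.getD i ' ' = '\\'
  · have hng : ¬ (i + 1 < cs.length ∧ (escMap? (cs.getD (i + 1) ' ')).isSome = true) := by tauto
    rw [bScan]
    split
    · rename_i hf
      rw [findBS_self hi hc] at hf
      exact absurd hf (by simp)
    · rename_i j hf
      rw [findBS_self hi hc] at hf
      obtain rfl : j = i := by simpa using hf.symm
      rw [if_neg hng]
  · rw [bScan, findBS_succ hi hc, bScan]

lemma bScan_match {cs : List Char} {i : Nat} (hi : i + 1 < cs.length)
    (hc : cs.getD i ' ' = '\\') (he : (escMap? (cs.getD (i + 1) ' ')).isSome) :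
    bScan cs i = i :: bScan cs (i + 2) := by
  rw [bScan]
  split
  · rename_i hf
    rw [findBS_self (by omega) hc] at hf
    exact absurd hf (by simp)
  · rename_i j hf
    rw [findBS_self (by omega) hc] at hf
    obtain rfl : j = i := by simpa using hf.symm
    rw [if_pos ⟨hi, he⟩]

lemma bScan_ge_aux (k : Nat) : ∀ (cs : List Char) (i : Nat), cs.length - i ≤ k →
    ∀ m ∈ bScan cs i, i ≤ m := by
  induction k with
  | zero =>
    intro cs i hk
    rw [bScan_nil (by omega)]
    simp
  | succ k ih =>
    intro cs i hk
    rw [bScan]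
    split
    · simp
    · rename_i j hf
      have hb := findBS_bounds hf
      split
      · intro m hmem
        rcases List.mem_cons.mp hmem with rfl | hmem
        · omega
        · have := ih cs (j + 2) (by omega) m hmem; omega
      · intro m hmem
        have := ih cs (j + 1) (by omega) m hmem; omega

lemma bScan_ge {cs : List Char} {i : Nat} : ∀ m ∈ bScan cs i, i ≤ m :=
  bScan_ge_aux (cs.length - i) cs i le_rfl

lemma build_step {cs : List Char} {ms : List Nat} {i : Nat} (hi : i < cs.length)
    (hms : ∀ m ∈ ms, i + 1 ≤ m) :
    build cs ms i = (cs.getD i ' ' :: (build cs ms (i + 1)).1,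
                     (i : Int) :: (build cs ms (i + 1)).2) := by
  have hdrop : cs.drop i = cs[i] :: cs.drop (i + 1) := List.drop_eq_getElem_cons hi
  have hget : cs.getD i ' ' = cs[i] := by
    simp [List.getD_eq_getElem?_getD, List.getElem?_eq_getElem hi]
  cases ms with
  | nil =>
    have hlen : cs.length - i = (cs.length - (i + 1)) + 1 := by omega
    simp only [build, hdrop, hget, hlen, List.range'_succ, List.map_cons]
    rfl
  | cons m rest =>
    have hm : i + 1 ≤ m := hms m (List.mem_cons_self ..)
    have htake : m - i = (m - (i + 1)) + 1 := by omega
    simp only [build, hdrop, hget, htake, List.take_succ_cons, List.range'_succ,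
      List.map_cons, List.cons_append]
    rfl

lemma headD_drop {cs : List Char} {i : Nat} (hi : i < cs.length) :
    (cs.drop i).headD ' ' = cs.getD i ' ' := by
  rw [List.drop_eq_getElem_cons hi]
  simp [List.getD_eq_getElem?_getD, List.getElem?_eq_getElem hi]

lemma main_lemma (k : Nat) : ∀ (cs : List Char) (i : Nat), cs.length - i ≤ k →
    build cs (bScan cs i) i = aGo (cs.drop i) i := by
  induction k with
  | zero =>
    intro cs i hk
    have hge : cs.length ≤ i := by omega
    rw [bScan_nil hge, List.drop_eq_nil_of_le hge]
    simp [build, aGo, Nat.sub_eq_zero_of_le hge, hge]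
  | succ k ih =>
    intro cs i hk
    by_cases hi : i < cs.length
    · have hdrop : cs.drop i = cs[i] :: cs.drop (i + 1) := List.drop_eq_getElem_cons hi
      have hget : cs.getD i ' ' = cs[i] := by
        simp [List.getD_eq_getElem?_getD, List.getElem?_eq_getElem hi]
      by_cases hmatch : i + 1 < cs.length ∧ cs.getD i ' ' = '\\' ∧
          (escMap? (cs.getD (i + 1) ' ')).isSome
      · obtain ⟨h1, h2, h3⟩ := hmatch
        have hget1 : cs.getD (i + 1) ' ' = cs[i + 1] := by
          simp [List.getD_eq_getElem?_getD, List.getElem?_eq_getElem h1]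
        have hdrop1 : cs.drop (i + 1) = cs[i + 1] :: cs.drop (i + 2) :=
          List.drop_eq_getElem_cons h1
        have hbs : cs[i] = '\\' := hget ▸ h2
        rw [bScan_match h1 h2 h3]
        rw [hget1] at h3
        have hih := ih cs (i + 2) (by omega)
        simp only [build, hih, Nat.sub_self, List.take_zero, List.range'_zero,
          List.map_nil, List.nil_append, hget1]
        rw [hdrop, hdrop1, hbs, aGo_match _ _ _ h3]
      · rw [bScan_skip hi hmatch]
        rw [build_step hi (fun m hm => Nat.le_of_lt_succ (Nat.lt_succ_of_le (bScan_ge m hm)))]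
        rw [ih cs (i + 1) (by omega), hdrop, hget]
        have hcond : ¬ (cs.drop (i + 1) ≠ [] ∧ cs[i] = '\\' ∧
            (escMap? ((cs.drop (i + 1)).headD ' ')).isSome = true) := by
          rintro ⟨hne, hbs, hsome⟩
          apply hmatch
          have h1 : i + 1 < cs.length := by
            by_contra hge
            push Not at hge
            exact hne (List.drop_eq_nil_of_le hge)
          refine ⟨h1, hget ▸ hbs, ?_⟩
          rwa [headD_drop h1] at hsome
        rw [aGo_lit _ _ _ hcond]
    · push Not at hi
      rw [bScan_nil hi, List.drop_eq_nil_of_le hi]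
      simp [build, aGo, Nat.sub_eq_zero_of_le hi, hi]

-- ===== VERDICT (by name: the statement is the Claim_ definition above) =====
theorem transform_escape_expanded_py_spec : Claim_equal_transform_escape_expanded_py := by
  intro text _
  have h := main_lemma text.toList.length text.toList 0 (by omega)
  rw [List.drop_zero] at h
  unfold Spec_transform_escape_expanded_py transform_escape_expanded_py transform_escape_expanded_py_alt
  simp only [h]
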